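-- pv_equiv track=rewrite | github.com/sarkarghya/NYU-NYUSH-CS | DS_210/W1/HW/Q1_BlockPalindrome.py | block_palindrome
-- ===== SOURCE A (Python) =====
-- def block_palindrome(n):
--     """
--     :param n: a positive integer
--     :return: True if n is a block-wise palindrome in blocks size of 2
--              False otherwise.
--     """
--     # To do
--     old = n #notice 4 bit numbers
--     new = 0
--     while n > 0:
--         rem = n & (2**2 -1) # reminder of power of 2
--         n = (n >> 2) # 2 (power of 2 for mod) - 1
--         new = (new << 2) | rem # xor is addition mod 2
--     return old==new
-- ===== SOURCE B (Python) =====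
-- def block_palindrome(n):
--     blocks = []
--     m = n
--     while m > 0:
--         blocks.append(m & 3)
--         m >>= 2
--     return n >= 0 and blocks == blocks[::-1]
-- ===== Notes on version B (the rewrite author's own statement) =====
-- stated objective: alternative
-- what changed: B collects the 2-bit blocks of n into a list and tests whether that list equals its reverse, replacing A's arithmetic reconstruction of the block-reversed integer and integer comparison.
import Mathlib
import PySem

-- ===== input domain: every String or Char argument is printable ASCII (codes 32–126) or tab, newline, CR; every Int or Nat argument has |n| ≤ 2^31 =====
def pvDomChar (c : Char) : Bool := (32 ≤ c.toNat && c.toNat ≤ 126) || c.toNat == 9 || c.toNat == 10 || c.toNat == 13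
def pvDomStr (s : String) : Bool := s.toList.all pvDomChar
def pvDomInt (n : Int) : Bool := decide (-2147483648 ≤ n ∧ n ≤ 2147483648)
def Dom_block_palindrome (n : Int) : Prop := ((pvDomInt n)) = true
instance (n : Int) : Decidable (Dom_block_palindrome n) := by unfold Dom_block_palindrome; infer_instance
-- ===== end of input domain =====

-- B collects the 2-bit blocks of n into a list and compares it with its reverse,
-- instead of A's arithmetic reconstruction of the block-reversed integer (objective: alternative).


-- ===== PORT A =====
-- the while loop of A: state (n, new); each step: rem = n & 3; n = n >> 2; new = (new << 2) | rem
def blockPalLoop (n new : Int) : Int :=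
  if h : 0 < n then
    blockPalLoop (n >>> (2:Nat)) (PySem.Int.bor (new <<< (2:Nat)) (PySem.Int.band n 3))
  else new
termination_by n.toNat
decreasing_by
  rw [Int.shiftRight_eq_div_pow]
  omega

def block_palindrome (n : Int) : Bool :=
  -- old = n; loop; return old == new
  n == blockPalLoop n 0

-- ===== PORT B =====
-- the while loop of B: blocks.append(m & 3); m >>= 2
def blocksOf (m : Int) : List Int :=
  if h : 0 < m then
    PySem.Int.band m 3 :: blocksOf (m >>> (2:Nat))
  else []
termination_by m.toNat
decreasing_by
  rw [Int.shiftRight_eq_div_pow]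
  omega

def block_palindrome_alt (n : Int) : Bool :=
  decide (0 ≤ n) && (blocksOf n == (blocksOf n).reverse)

-- ===== PRECONDITION & SPEC =====
def Spec_block_palindrome (n : Int) (out : Bool) : Prop := out = block_palindrome_alt n
instance (n : Int) (out : Bool) : Decidable (Spec_block_palindrome n out) := by unfold Spec_block_palindrome; infer_instance

-- ===== CLAIM (what is proved, stated in full; the proofs are below) =====
def Claim_equal_block_palindrome : Prop := ∀ (n : Int), Dom_block_palindrome n → Spec_block_palindrome n (block_palindrome n)

-- ===== LEMMAS AND PROOFS =====

-- big-endian value of a digit list in base 4, starting from accumulator a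
def bigval (l : List Int) (a : Int) : Int := l.foldl (fun x d => x * 4 + d) a

theorem band3_eq_mod (n : Int) (h : 0 ≤ n) : PySem.Int.band n 3 = n % 4 := by
  rw [PySem.Int.band_of_nonneg h (by norm_num)]
  have h1 := Nat.and_two_pow_sub_one_eq_mod n.toNat 2
  have h3 : Int.toNat 3 = 3 := rfl
  norm_num at h1
  rw [h3, h1]
  omega

-- low two bits: m &&& 3 on Nat is m % 4
theorem nat_or4 (a y : Nat) (hy : y < 4) : 4 * a ||| y = 4 * a + y := by
  interval_cases y
  · simp
  · have h1 : (4*a : Nat) = Nat.bit false (Nat.bit false a) := by simp [Nat.bit]; ring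
    have h2 : (1:Nat) = Nat.bit true (Nat.bit false 0) := by decide
    rw [h1, h2, Nat.lor_bit, Nat.lor_bit]
    simp [Nat.bit]; try ring
  · have h1 : (4*a : Nat) = Nat.bit false (Nat.bit false a) := by simp [Nat.bit]; ring
    have h2 : (2:Nat) = Nat.bit false (Nat.bit true 0) := by decide
    rw [h1, h2, Nat.lor_bit, Nat.lor_bit]
    simp [Nat.bit]; try ring
  · have h1 : (4*a : Nat) = Nat.bit false (Nat.bit false a) := by simp [Nat.bit]; ring
    have h2 : (3:Nat) = Nat.bit true (Nat.bit true 0) := by decide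
    rw [h1, h2, Nat.lor_bit, Nat.lor_bit]
    simp [Nat.bit]; try ring

theorem shl_or_eq (a r : Int) (ha : 0 ≤ a) (hr0 : 0 ≤ r) (hr : r < 4) :
    PySem.Int.bor (a <<< (2:Nat)) r = a * 4 + r := by
  have hshl : a <<< (2:Nat) = a * 4 := by
    rw [Int.shiftLeft_eq]
    norm_num
  rw [hshl, PySem.Int.bor_of_nonneg (by omega) hr0]
  have ht : (a * 4).toNat = 4 * a.toNat := by omega
  rw [ht, nat_or4 a.toNat r.toNat (by omega)]
  omega

theorem shr2_eq (n : Int) : n >>> (2:Nat) = n / 4 := by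
  rw [Int.shiftRight_eq_div_pow]
  norm_num

theorem blocksOf_digits (m : Int) : ∀ d ∈ blocksOf m, 0 ≤ d ∧ d < 4 := by
  induction m using blocksOf.induct with
  | case1 m h ih =>
    rw [blocksOf, dif_pos h]
    intro d hd
    rcases List.mem_cons.mp hd with rfl | hd'
    · rw [band3_eq_mod m (le_of_lt h)]
      omega
    · exact ih d hd'
  | case2 m h =>
    rw [blocksOf, dif_neg h]
    intro d hd
    simp at hd

theorem loop_eq_bigval (n : Int) : ∀ a : Int, 0 ≤ a → blockPalLoop n a = bigval (blocksOf n) a := by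
  induction n using blocksOf.induct with
  | case1 n h ih =>
    intro a ha
    have hband : PySem.Int.band n 3 = n % 4 := band3_eq_mod n (le_of_lt h)
    have hb : 0 ≤ n % 4 ∧ n % 4 < 4 := by omega
    rw [blockPalLoop, dif_pos h, blocksOf, dif_pos h]
    rw [show PySem.Int.bor (a <<< (2:Nat)) (PySem.Int.band n 3) = a * 4 + n % 4 by
      rw [hband]; exact shl_or_eq a (n % 4) ha hb.1 hb.2]
    rw [ih (a * 4 + n % 4) (by omega)]
    unfold bigval
    simp only [List.foldl_cons, hband]
  | case2 n h =>
    intro a _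
    rw [blockPalLoop, dif_neg h, blocksOf, dif_neg h]
    rfl

theorem bigval_reverse (m : Int) : 0 ≤ m → bigval (blocksOf m).reverse 0 = m := by
  induction m using blocksOf.induct with
  | case1 m h ih =>
    intro _
    rw [blocksOf, dif_pos h]
    unfold bigval
    rw [List.reverse_cons, List.foldl_append]
    have ihv : bigval (blocksOf (m >>> (2:Nat))).reverse 0 = m >>> (2:Nat) := by
      apply ih
      rw [shr2_eq]
      omega
    unfold bigval at ihv
    rw [ihv]
    simp only [List.foldl_cons, List.foldl_nil]
    rw [shr2_eq, band3_eq_mod m (le_of_lt h)]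
    omega
  | case2 m h =>
    intro hm
    rw [blocksOf, dif_neg h]
    simp only [List.reverse_nil]
    unfold bigval
    simp only [List.foldl_nil]
    omega

theorem bigval_shift (l : List Int) : ∀ a : Int, bigval l a = a * 4 ^ l.length + bigval l 0 := by
  induction l with
  | nil => intro a; unfold bigval; simp
  | cons d t ih =>
    intro a
    unfold bigval
    simp only [List.foldl_cons, List.length_cons]
    show bigval t (a * 4 + d) = a * 4 ^ (t.length + 1) + bigval t (0 * 4 + d)
    rw [ih (a * 4 + d), ih (0 * 4 + d)]
    ring

theorem bigval_bounds (l : List Int) (hd : ∀ d ∈ l, 0 ≤ d ∧ d < 4) :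
    0 ≤ bigval l 0 ∧ bigval l 0 < 4 ^ l.length := by
  induction l with
  | nil => unfold bigval; simp
  | cons d t ih =>
    have hdt : ∀ x ∈ t, 0 ≤ x ∧ x < 4 := fun x hx => hd x (List.mem_cons_of_mem d hx)
    have hdd := hd d List.mem_cons_self
    have iht := ih hdt
    unfold bigval
    simp only [List.foldl_cons, List.length_cons]
    show 0 ≤ bigval t (0 * 4 + d) ∧ bigval t (0 * 4 + d) < 4 ^ (t.length + 1)
    rw [bigval_shift t (0 * 4 + d), show ((0:Int) * 4 + d) = d by ring]
    have hp : (0:Int) < 4 ^ t.length := by positivity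
    have h1 : d * 4 ^ t.length ≤ 3 * 4 ^ t.length :=
      mul_le_mul_of_nonneg_right (by omega) (le_of_lt hp)
    have h2 : 0 ≤ d * 4 ^ t.length := mul_nonneg hdd.1 (le_of_lt hp)
    have : (4:Int) ^ (t.length + 1) = 4 * 4 ^ t.length := by ring
    omega

theorem bigval_inj (l : List Int) : ∀ l' : List Int, l.length = l'.length →
    (∀ d ∈ l, 0 ≤ d ∧ d < 4) → (∀ d ∈ l', 0 ≤ d ∧ d < 4) →
    bigval l 0 = bigval l' 0 → l = l' := by
  induction l with
  | nil =>
    intro l' hlen _ _ _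
    exact (List.length_eq_zero_iff.mp hlen.symm).symm
  | cons d t ih =>
    intro l' hlen hd hd' hv
    cases l' with
    | nil => simp at hlen
    | cons d' t' =>
      simp only [List.length_cons, Nat.add_right_cancel_iff] at hlen
      have hdt : ∀ x ∈ t, 0 ≤ x ∧ x < 4 := fun x hx => hd x (List.mem_cons_of_mem d hx)
      have hdt' : ∀ x ∈ t', 0 ≤ x ∧ x < 4 := fun x hx => hd' x (List.mem_cons_of_mem d' hx)
      have hdd := hd d List.mem_cons_self
      have hdd' := hd' d' List.mem_cons_self
      have hb := bigval_bounds t hdt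
      have hb' := bigval_bounds t' hdt'
      rw [← hlen] at hb'
      have e1 : bigval (d :: t) 0 = d * 4 ^ t.length + bigval t 0 := by
        show bigval t (0 * 4 + d) = _
        rw [bigval_shift t (0 * 4 + d)]
        ring
      have e2 : bigval (d' :: t') 0 = d' * 4 ^ t'.length + bigval t' 0 := by
        show bigval t' (0 * 4 + d') = _
        rw [bigval_shift t' (0 * 4 + d')]
        ring
      rw [e1, e2, ← hlen] at hv
      have hp : (0:Int) < 4 ^ t.length := by positivity
      have hdeq : d = d' := by
        by_contra hne
        rcases lt_or_gt_of_ne hne with hlt | hgt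
        · have : (d + 1) * 4 ^ t.length ≤ d' * 4 ^ t.length :=
            mul_le_mul_of_nonneg_right (by omega) (le_of_lt hp)
          nlinarith
        · have : (d' + 1) * 4 ^ t.length ≤ d * 4 ^ t.length :=
            mul_le_mul_of_nonneg_right (by omega) (le_of_lt hp)
          nlinarith
      subst hdeq
      have : bigval t 0 = bigval t' 0 := by
        have := hv
        omega
      rw [ih t' hlen hdt hdt' this]

-- ===== VERDICT (by name: the statement is the Claim_ definition above) =====
theorem block_palindrome_spec : Claim_equal_block_palindrome := by
  intro n _
  unfold Spec_block_palindrome block_palindrome block_palindrome_alt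
  by_cases h : 0 ≤ n
  · rw [loop_eq_bigval n 0 le_rfl]
    have hv := bigval_reverse n h
    have hd := blocksOf_digits n
    have hd' : ∀ d ∈ (blocksOf n).reverse, 0 ≤ d ∧ d < 4 :=
      fun d hdm => hd d (List.mem_reverse.mp hdm)
    rw [decide_eq_true h, Bool.true_and, Bool.eq_iff_iff]
    simp only [beq_iff_eq]
    constructor
    · intro hEq
      exact (bigval_inj (blocksOf n).reverse (blocksOf n) (by simp) hd' hd
        (by rw [hv, ← hEq])).symm
    · intro hEq
      conv_lhs => rw [← hv]
      rw [← hEq]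
  · have hn : n < 0 := by omega
    have hb : blocksOf n = [] := by rw [blocksOf]; simp [not_lt.mpr (le_of_lt hn)]
    have hl : blockPalLoop n 0 = 0 := by rw [blockPalLoop]; simp [not_lt.mpr (le_of_lt hn)]
    rw [hl, hb]
    have h1 : (n == (0:Int)) = false := by rw [beq_eq_false_iff_ne]; omega
    rw [h1, decide_eq_false h, Bool.false_and]
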